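-- pv_equiv track=rewrite | github.com/adrielschmitz/UFFS-CC | 5º Semestre/LFA/Trabalho AFD/projetoPratico_LFA/Projeto.py | add_token
-- ===== SOURCE A (Python) =====
-- def add_token(A, token):
--     p = 0
--     for i in token:
--         prod = A[p]
--         if prod != '':
--             prod += ' '
--         prod += i + '<' + str(len(A)) + '>'
--         A[p] = prod
--         p = len(A)
--         A.append('<'+ str(p) + '> ::=')
--     A[len(A)-1] += ' eps'
--     return A
-- ===== SOURCE B (Python) =====
-- # B: builds the new productions BACK-TO-FRONT (the eps rule first, then each chain
-- # rule from the last character towards the first), reverses once, and splices the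
-- # whole result in with a single assignment -- no write pointer p and no placeholder
-- # '<k> ::=' entries patched on the next iteration. Mutates A in place like A.
-- def add_token(A, token):
--     if token == '':
--         A[-1] += ' eps'
--         return A
--     base = len(A)
--     m = len(token)
--     rev = ['<' + str(base + m - 1) + '> ::= eps']
--     for j in range(m - 1, 0, -1):
--         rev.append('<' + str(base + j - 1) + '> ::= ' + token[j] + '<' + str(base + j) + '>')
--     head = A[0] + (' ' if A[0] else '') + token[0] + '<' + str(base) + '>'
--     A[:] = [head] + A[1:] + rev[::-1]
--     return A
-- ===== Notes on version B (the rewrite author's own statement) =====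
-- stated objective: alternative
-- what changed: B builds the appended productions back-to-front (eps rule first, then chain rules from the last token character towards the first), reverses once and splices the whole result with a single assignment, replacing A's stateful loop with write pointer p and placeholder '<k> ::=' entries that are patched on the next iteration.
import Mathlib
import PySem

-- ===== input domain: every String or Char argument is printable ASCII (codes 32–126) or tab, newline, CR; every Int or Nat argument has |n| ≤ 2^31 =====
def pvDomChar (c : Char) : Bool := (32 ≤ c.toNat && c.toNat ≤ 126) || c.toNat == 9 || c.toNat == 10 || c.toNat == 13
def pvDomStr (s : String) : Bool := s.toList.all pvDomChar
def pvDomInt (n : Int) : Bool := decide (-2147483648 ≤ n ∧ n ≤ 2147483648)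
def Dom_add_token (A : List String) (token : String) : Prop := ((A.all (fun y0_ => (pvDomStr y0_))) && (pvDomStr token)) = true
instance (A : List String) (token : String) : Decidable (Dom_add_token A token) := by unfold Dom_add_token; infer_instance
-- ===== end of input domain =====

-- B builds the appended productions back-to-front (eps rule first, then chain rules from the
-- last token character towards the first), reverses once, and splices the whole result with a
-- single assignment, replacing A's pointer/placeholder-patching loop. Both Pythons mutate A in place identically; the
-- theorems are about the return value.

-- ===== PORT A =====
-- loop body of A: prod = A[p]; optional ' '; prod += i + '<' + str(len(A)) + '>'; A[p] = prod; p = len(A); A.append('<p> ::=')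
def aStep_add_token (st : List String × Int) (i : Char) : List String × Int :=
  let prod := PySem.List.pyGetD st.1 st.2 ""   -- A[p]; out of range (A = []) excluded by Pre_
  let prod := if prod ≠ "" then prod ++ " " else prod
  let prod := prod ++ (String.ofList [i] ++ "<" ++ PySem.Int.toStr (PySem.List.len st.1) ++ ">")
  let A' := PySem.List.pySetD st.1 st.2 prod
  let p := PySem.List.len A'
  (A' ++ ["<" ++ PySem.Int.toStr p ++ "> ::="], p)

def add_token (A : List String) (token : String) : List String :=
  let st := token.toList.foldl aStep_add_token (A, 0)
  -- A[len(A)-1] += ' eps'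
  PySem.List.pySetD st.1 (PySem.List.len st.1 - 1)
    (PySem.List.pyGetD st.1 (PySem.List.len st.1 - 1) "" ++ " eps")

-- ===== PORT B =====
-- loop body of B: rev.append('<' + str(base+j-1) + '> ::= ' + token[j] + '<' + str(base+j) + '>')
def bStep_add_token (tok : List Char) (base : Int) (acc : List String) (j : Int) : List String :=
  acc ++ ["<" ++ PySem.Int.toStr (base + j - 1) ++ "> ::= "
          ++ String.ofList [PySem.List.pyGetD tok j ' ']
          ++ "<" ++ PySem.Int.toStr (base + j) ++ ">"]

def add_token_alt (A : List String) (token : String) : List String :=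
  match token.toList with
  | [] => PySem.List.pySetD A (-1) (PySem.List.pyGetD A (-1) "" ++ " eps")   -- A[-1] += ' eps'
  | c :: cs =>
    let base := PySem.List.len A
    let m := PySem.Str.len token
    let rev0 : List String := ["<" ++ PySem.Int.toStr (base + m - 1) ++ "> ::= eps"]
    -- for j in range(m-1, 0, -1): rev.append(...)
    let rev := (PySem.List.pyRange (m - 1) 0 (-1)).foldl (bStep_add_token token.toList base) rev0
    let a0 := PySem.List.pyGetD A 0 ""
    let head := a0 ++ (if a0 ≠ "" then " " else "") ++ String.ofList [c] ++ "<" ++ PySem.Int.toStr base ++ ">"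
    -- A[:] = [head] + A[1:] + rev[::-1]   (rev[::-1] is List.reverse: PySem.List.slice?_none_none_neg_one)
    [head] ++ PySem.List.slice A (some 1) none ++ rev.reverse

-- ===== PRECONDITION & SPEC =====
-- Pre_ excludes only A = [], on which the Python A raises IndexError (A[0] or A[-1] on an empty list).
def Pre_add_token (A : List String) (token : String) : Prop := A ≠ []
instance (A : List String) (token : String) : Decidable (Pre_add_token A token) := by unfold Pre_add_token; infer_instance
def pvWitness_add_token : List String × String := (["S"], "ab")
def Spec_add_token (A : List String) (token : String) (out : List String) : Prop := out = add_token_alt A token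
instance (A : List String) (token : String) (out : List String) : Decidable (Spec_add_token A token out) := by unfold Spec_add_token; infer_instance

-- ===== CLAIM (what is proved, stated in full; the proofs are below) =====
def Claim_equal_add_token : Prop := ∀ (A : List String) (token : String), Dom_add_token A token → Pre_add_token A token → Spec_add_token A token (add_token A token)

-- ===== LEMMAS AND PROOFS =====

-- the finished middle productions both programs end up with, starting at nonterminal index k
def prodsH (k : Int) : List Char → List String
  | [] => []
  | c :: cs => ("<" ++ PySem.Int.toStr k ++ "> ::= " ++ String.ofList [c] ++ "<" ++ PySem.Int.toStr (k+1) ++ ">") :: prodsH (k+1) cs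

-- A's placeholder production
def phH (k : Int) : String := "<" ++ PySem.Int.toStr k ++ "> ::="

theorem phH_ne (k : Int) : phH k ≠ "" := by
  intro h; apply_fun String.toList at h; simp [phH] at h

theorem prod_merge (k k2 : Int) (c : Char) :
    (if phH k ≠ "" then phH k ++ " " else phH k) ++ (String.ofList [c] ++ "<" ++ PySem.Int.toStr k2 ++ ">")
    = "<" ++ PySem.Int.toStr k ++ "> ::= " ++ String.ofList [c] ++ "<" ++ PySem.Int.toStr k2 ++ ">" := by
  rw [if_pos (phH_ne k)]
  apply String.toList_inj.mp; simp [phH]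

theorem eps_merge (k : Int) : phH k ++ " eps" = "<" ++ PySem.Int.toStr k ++ "> ::= eps" := by
  apply String.toList_inj.mp; simp [phH]

theorem aStep_eval (L : List String) (c : Char) :
    aStep_add_token (L ++ [phH (L.length : Int)], (L.length : Int)) c
    = ((L ++ [("<" ++ PySem.Int.toStr (L.length : Int) ++ "> ::= " ++ String.ofList [c]
        ++ "<" ++ PySem.Int.toStr ((L.length : Int)+1) ++ ">")]) ++ [phH ((L.length : Int) + 1)],
       (L.length : Int) + 1) := by
  have hget : PySem.List.pyGetD (L ++ [phH (L.length : Int)]) ((L.length : Int)) "" = phH (L.length : Int) := by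
    simp [List.getD]
  simp only [aStep_add_token, hget, PySem.List.pySetD_natCast, PySem.List.len_eq]
  rw [prod_merge]
  simp [phH]

theorem aloop (cs : List Char) : ∀ (L : List String),
    cs.foldl aStep_add_token (L ++ [phH (L.length : Int)], (L.length : Int))
    = (L ++ prodsH (L.length : Int) cs ++ [phH ((L.length : Int) + cs.length)],
       (L.length : Int) + cs.length) := by
  induction cs with
  | nil => intro L; simp [prodsH]
  | cons c cs ih =>
    intro L
    rw [List.foldl_cons, aStep_eval]
    set e := ("<" ++ PySem.Int.toStr (L.length : Int) ++ "> ::= " ++ String.ofList [c]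
        ++ "<" ++ PySem.Int.toStr ((L.length : Int)+1) ++ ">") with he
    have hlen : ((L.length : Int) + 1) = (((L ++ [e]).length : Nat) : Int) := by simp
    rw [hlen, ih (L ++ [e])]
    rw [← hlen]
    simp only [prodsH, ← he, List.append_assoc, List.length_cons]
    have h2 : ((L.length : Int) + 1 + (cs.length : Nat)) = (L.length : Int) + ((cs.length + 1 : Nat) : Int) := by
      push_cast; ring
    rw [h2]
    simp

-- B's reversed loop: rev (after the countdown loop) reversed = middle productions ++ eps rule
theorem bloopAsc (tok : List Char) (base : Int) (cs : List Char) : ∀ (j : Nat),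
    tok.drop j = cs → j ≤ tok.length →
    (PySem.List.pyRange (j : Int) ((j : Int) + (cs.length : Int)) 1).map
        (fun k => "<" ++ PySem.Int.toStr (base + k - 1) ++ "> ::= "
          ++ String.ofList [PySem.List.pyGetD tok k ' ']
          ++ "<" ++ PySem.Int.toStr (base + k) ++ ">")
    = prodsH (base + j - 1) cs := by
  induction cs with
  | nil =>
    intro j _ _
    rw [PySem.List.pyRange_one_eq_nil (by simp)]
    simp [prodsH]
  | cons c cs ih =>
    intro j hdrop hle
    have hlen : tok.length = j + (cs.length + 1) := by
      have := congrArg List.length hdrop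
      simp at this; omega
    rw [PySem.List.pyRange_one_cons (by simp)]
    rw [List.map_cons]
    have hc : tok[j]? = some c := by
      have h0 : (tok.drop j)[0]? = some c := by rw [hdrop]; rfl
      rw [List.getElem?_drop] at h0
      simpa using h0
    have hget : PySem.List.pyGetD tok (j : Int) ' ' = c := by
      simp [List.getD, hc]
    rw [hget]
    have hb : ((j:Int) + 1) = ((j+1 : Nat) : Int) := by push_cast; ring
    have h2 : ((j:Int) + ((cs.length + 1 : Nat) : Int)) = (((j+1 : Nat) : Int) + ((cs.length : Nat) : Int)) := by push_cast; ring
    simp only [List.length_cons] at h2 ⊢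
    rw [hb, h2]
    rw [ih (j+1) (by rw [← List.drop_drop, hdrop]; simp) (by omega)]
    have h3 : base + ((j+1 : Nat) : Int) - 1 = base + (j:Int) - 1 + 1 := by push_cast; ring
    rw [h3]
    simp [prodsH]

theorem brev (tok : List Char) (base : Int) (c : Char) (cs : List Char) (htok : tok = c :: cs) :
    ((PySem.List.pyRange ((cs.length : Int) + 1 - 1) 0 (-1)).foldl (bStep_add_token tok base)
      ["<" ++ PySem.Int.toStr (base + ((cs.length : Int) + 1) - 1) ++ "> ::= eps"]).reverse
    = prodsH base cs ++ [phH (base + (cs.length : Int)) ++ " eps"] := by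
  have hfold := PySem.List.foldl_append_singleton_eq_map
      (fun j => "<" ++ PySem.Int.toStr (base + j - 1) ++ "> ::= "
          ++ String.ofList [PySem.List.pyGetD tok j ' ']
          ++ "<" ++ PySem.Int.toStr (base + j) ++ ">")
      (PySem.List.pyRange ((cs.length : Int) + 1 - 1) 0 (-1))
      ["<" ++ PySem.Int.toStr (base + ((cs.length : Int) + 1) - 1) ++ "> ::= eps"]
  rw [show bStep_add_token tok base = (fun acc j => acc ++ [(fun j => "<" ++ PySem.Int.toStr (base + j - 1) ++ "> ::= "
          ++ String.ofList [PySem.List.pyGetD tok j ' ']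
          ++ "<" ++ PySem.Int.toStr (base + j) ++ ">") j]) from rfl, hfold]
  rw [List.reverse_append, PySem.List.pyRange_neg_one_eq_reverse, List.map_reverse, List.reverse_reverse]
  have e0 : ((cs.length : Int) + 1 - 1) + 1 = (((1:Nat) : Int)) + (cs.length : Int) := by push_cast; ring
  rw [show (0 : Int) + 1 = (((1:Nat)) : Int) from by norm_num, e0]
  rw [bloopAsc tok base cs 1 (by simp [htok]) (by simp [htok])]
  have e1 : base + (((1:Nat)) : Int) - 1 = base := by push_cast; ring
  have e2 : base + ((cs.length : Int) + 1) - 1 = base + (cs.length : Int) := by ring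
  rw [e1, e2, eps_merge]
  simp

theorem last_fix (xs : List String) (h : xs ≠ []) :
    PySem.List.pySetD xs ((xs.length : Int) - 1) (PySem.List.pyGetD xs ((xs.length : Int) - 1) "" ++ " eps")
    = PySem.List.pySetD xs (-1) (PySem.List.pyGetD xs (-1) "" ++ " eps") := by
  have hx : 0 < xs.length := List.length_pos_iff.mpr h
  have h1 : ((xs.length : Int) - 1) = ((xs.length - 1 : Nat) : Int) := by push_cast [hx]; omega
  rw [h1, PySem.List.pySetD_natCast, PySem.List.pyGetD_natCast]
  rw [PySem.List.pyGetD_neg_one xs "" h]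
  have h2 : PySem.List.pySetD xs (-1) (xs.getLast h ++ " eps") = xs.set (xs.length - 1) (xs.getLast h ++ " eps") := by
    simp [PySem.List.pySetD, PySem.List.pySet?, PySem.List.pyIdx?]
    split_ifs with ha
    · rfl
    · omega
  have h3 : xs.getD (xs.length - 1) "" = xs.getLast h := by
    rw [List.getLast_eq_getElem, List.getD_eq_getElem?_getD, List.getElem?_eq_getElem (by omega)]
    rfl
  rw [h2, h3]

theorem final_step (ys : List String) (k : Int) :
    PySem.List.pySetD (ys ++ [phH k]) ((((ys ++ [phH k]).length : Nat) : Int) - 1)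
      (PySem.List.pyGetD (ys ++ [phH k]) ((((ys ++ [phH k]).length : Nat) : Int) - 1) "" ++ " eps")
    = ys ++ [phH k ++ " eps"] := by
  have h1 : (((ys ++ [phH k]).length : Nat) : Int) - 1 = ((ys.length : Nat) : Int) := by simp
  rw [h1, PySem.List.pySetD_natCast, PySem.List.pyGetD_natCast]
  simp [List.getD]

theorem aStep0 (a0 : String) (as : List String) (c : Char) :
    aStep_add_token (a0 :: as, 0) c
    = (((((if a0 ≠ "" then a0 ++ " " else a0) ++ (String.ofList [c] ++ "<" ++ PySem.Int.toStr (((a0 :: as).length : Nat) : Int) ++ ">")) :: as) : List String)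
        ++ [phH ((((if a0 ≠ "" then a0 ++ " " else a0) ++ (String.ofList [c] ++ "<" ++ PySem.Int.toStr (((a0 :: as).length : Nat) : Int) ++ ">")) :: as).length : Int)],
       ((((if a0 ≠ "" then a0 ++ " " else a0) ++ (String.ofList [c] ++ "<" ++ PySem.Int.toStr (((a0 :: as).length : Nat) : Int) ++ ">")) :: as).length : Int)) := by
  simp only [aStep_add_token, PySem.List.pyGetD_zero_cons, PySem.List.len_eq]
  simp [phH, PySem.List.pySetD_of_nonneg]

theorem add_token_eq_alt (A : List String) (token : String) (hpre : A ≠ []) :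
    add_token A token = add_token_alt A token := by
  match A, hpre with
  | a0 :: as, _ =>
  cases htok : token.toList with
  | nil =>
    simp only [add_token, add_token_alt, htok, List.foldl_nil, PySem.List.len_eq]
    exact last_fix (a0 :: as) (by simp)
  | cons c cs =>
    simp only [add_token, add_token_alt, htok, List.foldl_cons]
    rw [aStep0, aloop cs]
    set p1 := (if a0 ≠ "" then a0 ++ " " else a0) ++ (String.ofList [c] ++ "<" ++ PySem.Int.toStr (((a0 :: as).length : Nat) : Int) ++ ">") with hp1
    rw [show ((p1 :: as) ++ prodsH ((p1 :: as).length : Int) cs ++ [phH (((p1 :: as).length : Int) + (cs.length : Int))], (((p1 :: as).length : Int) + (cs.length : Int))).1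
        = ((p1 :: as) ++ prodsH ((p1 :: as).length : Int) cs) ++ [phH (((p1 :: as).length : Int) + (cs.length : Int))] from by rw [List.append_assoc]]
    simp only [PySem.List.len_eq]
    rw [final_step]
    have hhead : p1 = (PySem.List.pyGetD (a0 :: as) 0 "" ++ if PySem.List.pyGetD (a0 :: as) 0 "" ≠ "" then " " else "")
        ++ String.ofList [c] ++ "<" ++ PySem.Int.toStr (((a0 :: as).length : Nat) : Int) ++ ">" := by
      rw [hp1]; by_cases h : a0 = "" <;> simp [h]
      all_goals (apply String.toList_inj.mp; simp)
    have hm : PySem.Str.len token = (cs.length : Int) + 1 := by simp [PySem.Str.len_eq, htok]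
    have hlen : ((p1 :: as).length : Int) = (((a0 :: as).length : Nat) : Int) := by simp
    rw [PySem.List.slice_from_one, hm]
    rw [brev (c :: cs) _ c cs rfl, ← hhead, hlen]
    simp

-- ===== VERDICT (by name: the statement is the Claim_ definition above) =====
theorem add_token_spec : Claim_equal_add_token := by
  intro A token _ hpre
  show add_token A token = add_token_alt A token
  exact add_token_eq_alt A token hpre
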